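-- pv_equiv track=rewrite | github.com/fixxxera/Celebrirty | main.py | split_carib
-- ===== SOURCE A (Python) =====
-- def split_carib(ports):
--     wc = ['Costa Maya, Mexico', 'Cozumel, Mexico', 'Falmouth, Jamaica', 'George Town, Grand Cayman',
--           'Ocho Rios, Jamaica']
--
--     ec = ['Basseterre, St. Kitts', 'Bridgetown, Barbados', 'Castries, St. Lucia', 'Charlotte Amalie, St. Thomas',
--           'Fort De France', 'Kingstown, St. Vincent', 'Philipsburg, St. Maarten', 'Ponce, Puerto Rico',
--           'Punta Cana, Dominican Rep', 'Roseau, Dominica', 'San Juan, Puerto Rico', 'St. Croix, U.S.V.I.',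
--           "St. George's, Grenada", "St. John's, Antigua", 'Tortola, B.V.I']
--
--     bm = ['Kings Wharf, Bermuda']
--
--     ports_list = []
--     for i in range(len(ports)):
--
--         if i == 0:
--             pass
--         else:
--             ports_list.append(ports[i])
--     result = []
--     isbm = False
--     isec = False
--     iswc = False
--     for element in bm:
--         if element in ports_list:
--             isbm = True
--     if not isbm:
--         for element in ec:
--             if element in ports_list:
--                 isec = True
--     if not isec:
--         for element in wc:
--             if element in ports_list:
--                 iswc = True
--     if isbm:
--         result.append("Bermuda")
--         result.append("BM")
--         return result
--     elif isec:
--         result.append("East Carib")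
--         result.append("C")
--         return result
--     elif iswc:
--         result.append("West Carib")
--         result.append("C")
--         return result
--     else:
--         result.append("Carib")
--         result.append("C")
--         return result
-- ===== SOURCE B (Python) =====
-- # B: one dict mapping each known port to its region group, a single pass over
-- # ports[1:] collecting hit groups into a set, then the BM > EC > WC priority.
-- _REGION = {
--     'Kings Wharf, Bermuda': 'BM',
--     'Basseterre, St. Kitts': 'EC', 'Bridgetown, Barbados': 'EC',
--     'Castries, St. Lucia': 'EC', 'Charlotte Amalie, St. Thomas': 'EC',
--     'Fort De France': 'EC', 'Kingstown, St. Vincent': 'EC',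
--     'Philipsburg, St. Maarten': 'EC', 'Ponce, Puerto Rico': 'EC',
--     'Punta Cana, Dominican Rep': 'EC', 'Roseau, Dominica': 'EC',
--     'San Juan, Puerto Rico': 'EC', 'St. Croix, U.S.V.I.': 'EC',
--     "St. George's, Grenada": 'EC', "St. John's, Antigua": 'EC',
--     'Tortola, B.V.I': 'EC',
--     'Costa Maya, Mexico': 'WC', 'Cozumel, Mexico': 'WC',
--     'Falmouth, Jamaica': 'WC', 'George Town, Grand Cayman': 'WC',
--     'Ocho Rios, Jamaica': 'WC',
-- }
--
-- def split_carib(ports):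
--     found = set()
--     for p in ports[1:]:
--         g = _REGION.get(p)
--         if g is not None:
--             found.add(g)
--     if 'BM' in found:
--         return ['Bermuda', 'BM']
--     if 'EC' in found:
--         return ['East Carib', 'C']
--     if 'WC' in found:
--         return ['West Carib', 'C']
--     return ['Carib', 'C']
-- ===== Notes on version B (the rewrite author's own statement) =====
-- stated objective: faster
-- what changed: A rebuilds ports[1:] by an index loop and then scans the three region catalogs, testing membership of each of the 21 catalog entries in that list; B builds one port-to-group dictionary and makes a single pass over ports[1:], looking each port up and collecting hit groups into a set, then applies the BM > EC > WC priority.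
import Mathlib
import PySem

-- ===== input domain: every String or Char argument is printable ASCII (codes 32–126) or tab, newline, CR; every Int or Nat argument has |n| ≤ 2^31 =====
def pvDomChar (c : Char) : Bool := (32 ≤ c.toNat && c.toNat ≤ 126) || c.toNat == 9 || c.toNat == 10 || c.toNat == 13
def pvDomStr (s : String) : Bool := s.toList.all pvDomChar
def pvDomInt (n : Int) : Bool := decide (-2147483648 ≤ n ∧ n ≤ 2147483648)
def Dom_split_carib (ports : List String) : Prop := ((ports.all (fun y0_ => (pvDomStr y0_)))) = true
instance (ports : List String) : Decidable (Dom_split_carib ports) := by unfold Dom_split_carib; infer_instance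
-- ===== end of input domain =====

-- B replaces A's four sequential scans of the region catalogs (each testing membership in
-- a rebuilt ports list) by one port→group dictionary and a single pass over ports[1:]
-- collecting the hit groups into a set; equal return value, simpler single-pass shape.

-- ===== PORT A =====
def split_carib (ports : List String) : List String :=
  let wc := ["Costa Maya, Mexico", "Cozumel, Mexico", "Falmouth, Jamaica", "George Town, Grand Cayman",
             "Ocho Rios, Jamaica"]
  let ec := ["Basseterre, St. Kitts", "Bridgetown, Barbados", "Castries, St. Lucia", "Charlotte Amalie, St. Thomas",
             "Fort De France", "Kingstown, St. Vincent", "Philipsburg, St. Maarten", "Ponce, Puerto Rico",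
             "Punta Cana, Dominican Rep", "Roseau, Dominica", "San Juan, Puerto Rico", "St. Croix, U.S.V.I.",
             "St. George's, Grenada", "St. John's, Antigua", "Tortola, B.V.I"]
  let bm := ["Kings Wharf, Bermuda"]
  -- for i in range(len(ports)): if i == 0: pass else: ports_list.append(ports[i])
  -- (every index generated is in range, so ports[i] is pyGetD with an unused default)
  let ports_list := (PySem.List.pyRange 0 (ports.length : Int) 1).foldl
    (fun acc i => if i == 0 then acc else acc ++ [PySem.List.pyGetD ports i ""]) []
  let isbm := bm.foldl (fun b e => if ports_list.contains e then true else b) false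
  let isec := if !isbm then ec.foldl (fun b e => if ports_list.contains e then true else b) false else false
  let iswc := if !isec then wc.foldl (fun b e => if ports_list.contains e then true else b) false else false
  if isbm then ["Bermuda", "BM"]
  else if isec then ["East Carib", "C"]
  else if iswc then ["West Carib", "C"]
  else ["Carib", "C"]

-- ===== PORT B =====
def caribRegion : PySem.Dict String String := PySem.Dict.ofList
  [("Kings Wharf, Bermuda", "BM"),
   ("Basseterre, St. Kitts", "EC"), ("Bridgetown, Barbados", "EC"),
   ("Castries, St. Lucia", "EC"), ("Charlotte Amalie, St. Thomas", "EC"),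
   ("Fort De France", "EC"), ("Kingstown, St. Vincent", "EC"),
   ("Philipsburg, St. Maarten", "EC"), ("Ponce, Puerto Rico", "EC"),
   ("Punta Cana, Dominican Rep", "EC"), ("Roseau, Dominica", "EC"),
   ("San Juan, Puerto Rico", "EC"), ("St. Croix, U.S.V.I.", "EC"),
   ("St. George's, Grenada", "EC"), ("St. John's, Antigua", "EC"),
   ("Tortola, B.V.I", "EC"),
   ("Costa Maya, Mexico", "WC"), ("Cozumel, Mexico", "WC"),
   ("Falmouth, Jamaica", "WC"), ("George Town, Grand Cayman", "WC"),
   ("Ocho Rios, Jamaica", "WC")]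

def split_carib_alt (ports : List String) : List String :=
  let found : PySem.Set String :=
    (PySem.List.slice ports (some 1) none).foldl
      (fun s p =>
        match caribRegion.get? p with
        | some g => PySem.Set.add s g
        | none => s)
      PySem.Set.empty
  if found.contains "BM" then ["Bermuda", "BM"]
  else if found.contains "EC" then ["East Carib", "C"]
  else if found.contains "WC" then ["West Carib", "C"]
  else ["Carib", "C"]

-- ===== PRECONDITION & SPEC =====
def Spec_split_carib (ports : List String) (out : List String) : Prop := out = split_carib_alt ports
instance (ports : List String) (out : List String) : Decidable (Spec_split_carib ports out) := by unfold Spec_split_carib; infer_instance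

-- ===== CLAIM (what is proved, stated in full; the proofs are below) =====
def Claim_equal_split_carib : Prop := ∀ (ports : List String), Dom_split_carib ports → Spec_split_carib ports (split_carib ports)

-- ===== LEMMAS AND PROOFS =====

-- the rebuilt ports list of A is ports.tail
theorem pv_ports_list_eq_tail (ports : List String) :
    (PySem.List.pyRange 0 (ports.length : Int) 1).foldl
      (fun acc i => if i == 0 then acc else acc ++ [PySem.List.pyGetD ports i ""]) []
      = ports.tail := by
  cases ports with
  | nil => simp [PySem.List.pyRange]
  | cons a t =>
    have hlt : (0:Int) < ((a :: t).length : Int) := by simp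
    rw [PySem.List.pyRange_one_cons hlt]
    simp only [List.foldl_cons]
    rw [PySem.List.foldl_congr_mem _ _
        (fun acc i => acc ++ [PySem.List.pyGetD (a :: t) i ""]) _
        (by
          intro acc x hx
          rw [PySem.List.mem_pyRange_one] at hx
          rw [if_neg (by simp; omega)])]
    rw [PySem.List.foldl_append_singleton_eq_map]
    have h0 := PySem.List.map_pyGetD_pyRange_zero (a :: t) ""
    rw [show PySem.List.len (a :: t) = ((a :: t).length : Int) from rfl,
        PySem.List.pyRange_one_cons hlt, List.map_cons] at h0
    simpa using List.tail_eq_of_cons_eq h0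

-- first match in an assoc list with distinct keys finds exactly the stored pair
theorem pv_find?_fst_eq_some_iff (l : List (String × String)) (hnd : (l.map Prod.fst).Nodup)
    (p g : String) :
    (∃ a, l.find? (fun kv => kv.1 == p) = some (a, g)) ↔ (p, g) ∈ l := by
  induction l with
  | nil => simp
  | cons kv t ih =>
    obtain ⟨k, v⟩ := kv
    simp only [List.map_cons, List.nodup_cons] at hnd
    by_cases hk : k = p
    · subst hk
      simp only [List.find?_cons, beq_self_eq_true, List.mem_cons, Prod.mk.injEq]
      constructor
      · rintro ⟨a, ha⟩
        simp only [Option.some.injEq, Prod.mk.injEq] at ha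
        exact Or.inl ⟨trivial, ha.2.symm⟩
      · rintro (⟨-, hg⟩ | hmem)
        · exact ⟨k, by simp [hg]⟩
        · exact absurd (List.mem_map_of_mem (f := Prod.fst) hmem) hnd.1
    · simp only [List.find?_cons, List.mem_cons, Prod.mk.injEq]
      rw [show (k == p) = false by simp [hk]]
      simp only [ih hnd.2]
      constructor
      · exact Or.inr
      · rintro (⟨hp, -⟩ | h)
        · exact absurd hp.symm hk
        · exact h

-- membership of a group in B's found-set
theorem pv_mem_found (l : List String) (s : PySem.Set String) (g : String) :
    g ∈ l.foldl (fun s p =>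
        match caribRegion.get? p with
        | some v => PySem.Set.add s v
        | none => s) s
      ↔ g ∈ s ∨ ∃ p ∈ l, caribRegion.get? p = some g := by
  induction l generalizing s with
  | nil => simp
  | cons x t ih =>
    simp only [List.foldl_cons, List.mem_cons]
    cases hx : caribRegion.get? x with
    | none =>
      rw [ih]
      constructor
      · rintro (h | ⟨p, hp, hg⟩)
        · exact Or.inl h
        · exact Or.inr ⟨p, Or.inr hp, hg⟩
      · rintro (h | ⟨p, (rfl | hp), hg⟩)
        · exact Or.inl h
        · rw [hx] at hg; cases hg
        · exact Or.inr ⟨p, hp, hg⟩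
    | some v =>
      rw [ih]
      simp only [PySem.Set.mem_add]
      constructor
      · rintro ((h | rfl) | ⟨p, hp, hg⟩)
        · exact Or.inl h
        · exact Or.inr ⟨x, Or.inl rfl, hx⟩
        · exact Or.inr ⟨p, Or.inr hp, hg⟩
      · rintro (h | ⟨p, (rfl | hp), hg⟩)
        · exact Or.inl (Or.inl h)
        · rw [hx] at hg; exact Or.inl (Or.inr (Option.some.inj hg).symm)
        · exact Or.inr ⟨p, hp, hg⟩

-- the literal items of the region dictionary (distinct keys, so ofList keeps them as given)
theorem pv_caribRegion_items : caribRegion.items =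
    [("Kings Wharf, Bermuda", "BM"),
     ("Basseterre, St. Kitts", "EC"), ("Bridgetown, Barbados", "EC"),
     ("Castries, St. Lucia", "EC"), ("Charlotte Amalie, St. Thomas", "EC"),
     ("Fort De France", "EC"), ("Kingstown, St. Vincent", "EC"),
     ("Philipsburg, St. Maarten", "EC"), ("Ponce, Puerto Rico", "EC"),
     ("Punta Cana, Dominican Rep", "EC"), ("Roseau, Dominica", "EC"),
     ("San Juan, Puerto Rico", "EC"), ("St. Croix, U.S.V.I.", "EC"),
     ("St. George's, Grenada", "EC"), ("St. John's, Antigua", "EC"),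
     ("Tortola, B.V.I", "EC"),
     ("Costa Maya, Mexico", "WC"), ("Cozumel, Mexico", "WC"),
     ("Falmouth, Jamaica", "WC"), ("George Town, Grand Cayman", "WC"),
     ("Ocho Rios, Jamaica", "WC")] := by decide

theorem pv_get_iff (p g : String) :
    caribRegion.get? p = some g ↔ (p, g) ∈ caribRegion.items := by
  have hnd : (caribRegion.items.map Prod.fst).Nodup := by
    rw [pv_caribRegion_items]; decide
  rw [← pv_find?_fst_eq_some_iff _ hnd]
  simp only [PySem.Dict.get?, Option.map_eq_some_iff]
  constructor
  · rintro ⟨⟨a, v⟩, hfind, hv⟩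
    exact ⟨a, by subst hv; exact hfind⟩
  · rintro ⟨a, hfind⟩
    exact ⟨(a, g), hfind, rfl⟩

theorem pv_get_BM (p : String) :
    caribRegion.get? p = some "BM" ↔ p = "Kings Wharf, Bermuda" := by
  rw [pv_get_iff, pv_caribRegion_items]; simp

theorem pv_get_EC (p : String) :
    caribRegion.get? p = some "EC" ↔
      p ∈ ["Tortola, B.V.I", "St. John's, Antigua", "St. George's, Grenada",
           "St. Croix, U.S.V.I.", "San Juan, Puerto Rico", "Roseau, Dominica",
           "Punta Cana, Dominican Rep", "Ponce, Puerto Rico", "Philipsburg, St. Maarten",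
           "Kingstown, St. Vincent", "Fort De France", "Charlotte Amalie, St. Thomas",
           "Castries, St. Lucia", "Bridgetown, Barbados", "Basseterre, St. Kitts"] := by
  rw [pv_get_iff, pv_caribRegion_items]; simp; tauto

theorem pv_get_WC (p : String) :
    caribRegion.get? p = some "WC" ↔
      p ∈ ["Ocho Rios, Jamaica", "George Town, Grand Cayman", "Falmouth, Jamaica",
           "Cozumel, Mexico", "Costa Maya, Mexico"] := by
  rw [pv_get_iff, pv_caribRegion_items]; simp; tauto

-- ===== VERDICT (by name: the statement is the Claim_ definition above) =====
set_option maxHeartbeats 1600000 in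
theorem split_carib_spec : Claim_equal_split_carib := by
  intro ports _
  unfold Spec_split_carib split_carib split_carib_alt
  rw [pv_ports_list_eq_tail, PySem.List.slice_from_one]
  simp only [List.foldl_cons, List.foldl_nil]
  generalize ports.tail = t
  simp [pv_mem_found, pv_get_BM, pv_get_EC, pv_get_WC]
  simp only [and_or_left, exists_or, exists_eq_right]
  split_ifs <;> first | rfl | tauto
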